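-- pv_equiv track=rewrite | github.com/gsintes/Advent2020 | day06_customs.py | question_everyone_yes
-- ===== SOURCE A (Python) =====
-- from typing import List
--
-- def question_everyone_yes(group_input: str) -> List[str]:
--     person_answers = group_input.split("\n")
--     nb_pers = len(person_answers)
--     answered_everyone = []
--     if nb_pers == 1:
--         return [char for char in person_answers[0]]
--
--     for char in person_answers[0]:
--         ok = True
--         for i in range(1, nb_pers):
--             if char not in person_answers[i]:
--                 ok = False
--         if ok:
--             answered_everyone.append(char)
--     return answered_everyone
-- ===== SOURCE B (Python) =====
-- def question_everyone_yes(group_input: str):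
--     person_answers = group_input.split("\n")
--     common = set(person_answers[0])
--     for person in person_answers[1:]:
--         common &= set(person)
--     return [char for char in person_answers[0] if char in common]
-- ===== Notes on version B (the rewrite author's own statement) =====
-- stated objective: simpler
-- what changed: Replaces A's per-character rescan of every other person (nested loops with an ok flag and a special single-person branch) by one up-front set intersection across all persons followed by a single filtering pass over the first person's answer.
import Mathlib
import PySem

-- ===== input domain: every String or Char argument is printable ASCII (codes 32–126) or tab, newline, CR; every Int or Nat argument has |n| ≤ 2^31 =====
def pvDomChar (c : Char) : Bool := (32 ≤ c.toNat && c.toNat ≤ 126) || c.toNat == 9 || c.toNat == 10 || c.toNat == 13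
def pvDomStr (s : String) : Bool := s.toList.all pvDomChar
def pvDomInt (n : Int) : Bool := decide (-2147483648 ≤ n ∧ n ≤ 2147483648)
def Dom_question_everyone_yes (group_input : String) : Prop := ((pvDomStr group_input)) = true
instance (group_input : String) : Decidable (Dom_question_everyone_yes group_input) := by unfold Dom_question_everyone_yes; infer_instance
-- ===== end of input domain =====

-- B replaces A's per-character rescan of the other persons (nested loops with an ok flag and a
-- special single-person branch) by one up-front set intersection plus a single filtering pass
-- over the first person's answer (simpler).

-- ===== PORT A =====
def question_everyone_yes (group_input : String) : List String :=
  let person_answers := PySem.Chars.splitOn group_input.toList ['\n']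
  let nb_pers := person_answers.length
  if nb_pers = 1 then
    (PySem.List.pyGetD person_answers 0 []).map (fun c => String.ofList [c])
  else
    (PySem.List.pyGetD person_answers 0 []).foldl (fun answered_everyone c =>
      let ok := (PySem.List.pyRange 1 (nb_pers : Int)).foldl (fun ok i =>
        if !(PySem.Chars.isIn [c] (PySem.List.pyGetD person_answers i [])) then false else ok) true
      if ok then answered_everyone ++ [String.ofList [c]] else answered_everyone) []

-- ===== PORT B =====
def question_everyone_yes_alt (group_input : String) : List String :=
  let person_answers := PySem.Chars.splitOn group_input.toList ['\n']
  let common0 : PySem.Set Char := PySem.Set.ofList (PySem.List.pyGetD person_answers 0 [])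
  let common := (PySem.List.slice person_answers (some 1) none).foldl
      (fun com p => PySem.Set.inter com (PySem.Set.ofList p)) common0
  ((PySem.List.pyGetD person_answers 0 []).filter
      (fun c => PySem.Set.contains common c)).map (fun c => String.ofList [c])

-- ===== PRECONDITION & SPEC =====
def Spec_question_everyone_yes (group_input : String) (out : List String) : Prop := out = question_everyone_yes_alt group_input
instance (group_input : String) (out : List String) : Decidable (Spec_question_everyone_yes group_input out) := by unfold Spec_question_everyone_yes; infer_instance

-- ===== CLAIM (what is proved, stated in full; the proofs are below) =====
def Claim_equal_question_everyone_yes : Prop := ∀ (group_input : String), Dom_question_everyone_yes group_input → Spec_question_everyone_yes group_input (question_everyone_yes group_input)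

-- ===== LEMMAS AND PROOFS =====

-- membership in B's intersection fold
lemma mem_inter_fold {rest : List (List Char)} {s : PySem.Set Char} {c : Char} :
    c ∈ rest.foldl (fun com p => PySem.Set.inter com (PySem.Set.ofList p)) s ↔
      c ∈ s ∧ ∀ p ∈ rest, c ∈ p := by
  induction rest generalizing s with
  | nil => simp
  | cons p rest ih =>
    simp only [List.foldl_cons, ih, PySem.Set.mem_inter, PySem.Set.mem_ofList, List.mem_cons]
    constructor
    · rintro ⟨⟨h1, h2⟩, h3⟩
      exact ⟨h1, fun q hq => hq.elim (fun e => e ▸ h2) (h3 q)⟩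
    · rintro ⟨h1, h2⟩
      exact ⟨⟨h1, h2 p (Or.inl rfl)⟩, fun q hq => h2 q (Or.inr hq)⟩

-- A's inner ok-loop is an 'all'
lemma ok_fold {ps : List (List Char)} {c : Char} {b : Bool} {l : List Int} :
    l.foldl (fun ok i =>
        if !(PySem.Chars.isIn [c] (PySem.List.pyGetD ps i [])) then false else ok) b =
      (b && l.all (fun i => PySem.Chars.isIn [c] (PySem.List.pyGetD ps i []))) := by
  induction l generalizing b with
  | nil => simp
  | cons i l ih =>
    simp only [List.foldl_cons, List.all_cons, ih]
    cases h : PySem.Chars.isIn [c] (PySem.List.pyGetD ps i []) <;> simp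

lemma singleton_infix_iff {c : Char} {l : List Char} : [c] <:+: l ↔ c ∈ l := by
  constructor
  · intro h; exact h.mem (by simp)
  · intro h
    obtain ⟨a, b, rfl⟩ := List.append_of_mem h
    exact ⟨a, b, by simp⟩

lemma isIn_singleton {c : Char} {l : List Char} :
    PySem.Chars.isIn [c] l = true ↔ c ∈ l := by
  rw [PySem.Chars.isIn_iff_infix, singleton_infix_iff]

-- A's indexed scan over range(1, nb) says exactly 'c is in every person after the first'
lemma range_all_iff_tail {ps : List (List Char)} {c : Char} :
    (PySem.List.pyRange 1 (ps.length : Int)).all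
        (fun i => PySem.Chars.isIn [c] (PySem.List.pyGetD ps i [])) = true ↔
      ∀ p ∈ ps.tail, c ∈ p := by
  rw [List.all_eq_true]
  constructor
  · intro h p hp
    obtain ⟨j, hj, rfl⟩ := List.mem_iff_getElem.mp hp
    have hjl : j + 1 < ps.length := by
      have := hj; simp [List.length_tail] at this; omega
    have hmem : ((j : Int) + 1) ∈ PySem.List.pyRange 1 (ps.length : Int) :=
      PySem.List.mem_pyRange_one.mpr ⟨by omega, by exact_mod_cast hjl⟩
    have hv := h _ hmem
    have hval : ps.getD (((j : Int) + 1)).toNat [] = ps[j + 1] := by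
      rw [show (((j : Int) + 1)).toNat = j + 1 by omega]
      exact List.getD_eq_getElem ps [] hjl
    rw [PySem.List.pyGetD_of_nonneg ps [] (by omega), isIn_singleton, hval] at hv
    rw [List.getElem_tail]
    exact hv
  · intro h i hi
    obtain ⟨h1, h2⟩ := PySem.List.mem_pyRange_one.mp hi
    rw [PySem.List.pyGetD_of_nonneg ps [] (by omega), isIn_singleton]
    have hlt : i.toNat < ps.length := by omega
    rw [List.getD_eq_getElem ps [] hlt]
    have hn : i.toNat - 1 < ps.tail.length := by simp [List.length_tail]; omega
    have e : ps.tail[i.toNat - 1]'hn = ps[i.toNat]'hlt := by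
      rw [List.getElem_tail]
      congr 1
      omega
    rw [← e]
    exact h _ (List.getElem_mem hn)

-- ===== VERDICT (by name: the statement is the Claim_ definition above) =====
theorem question_everyone_yes_spec : Claim_equal_question_everyone_yes := by
  intro g _
  unfold Spec_question_everyone_yes question_everyone_yes question_everyone_yes_alt
  set ps := PySem.Chars.splitOn g.toList ['\n'] with hps
  simp only [PySem.List.slice_from_one]
  set p0 := PySem.List.pyGetD ps 0 [] with hp0
  have hB : ∀ c ∈ p0,
      ((ps.tail.foldl (fun com p => PySem.Set.inter com (PySem.Set.ofList p))
        (PySem.Set.ofList p0)).contains c = true ↔ ∀ p ∈ ps.tail, c ∈ p) := by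
    intro c hc
    rw [PySem.Set.contains_iff, mem_inter_fold, PySem.Set.mem_ofList]
    exact ⟨fun h => h.2, fun h => ⟨hc, h⟩⟩
  by_cases h1 : ps.length = 1
  · rw [if_pos h1]
    have htail : ps.tail = [] := by
      have : ps.tail.length = 0 := by rw [List.length_tail, h1]
      exact List.length_eq_zero_iff.mp this
    rw [htail]
    have : p0.filter (fun c =>
        ((([] : List (List Char)).foldl (fun com p => PySem.Set.inter com (PySem.Set.ofList p))
          (PySem.Set.ofList p0)).contains c)) = p0 := by
      apply List.filter_eq_self.mpr
      intro c hc
      rw [htail] at hB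
      exact (hB c hc).mpr (by simp)
    rw [this]
  · simp only [if_neg h1]
    rw [PySem.List.foldl_append_if
      (fun c => (PySem.List.pyRange 1 (ps.length : Int)).foldl (fun ok i =>
        if !(PySem.Chars.isIn [c] (PySem.List.pyGetD ps i [])) then false else ok) true)
      (fun c => String.ofList [c]) p0 []]
    simp only [List.nil_append]
    congr 1
    apply List.filter_congr
    intro c hc
    rw [ok_fold]
    simp only [Bool.true_and]
    exact Bool.eq_iff_iff.mpr (range_all_iff_tail.trans (hB c hc).symm)
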